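-- pv_equiv track=rewrite | github.com/t0r1n88/Lachesis | mental_state/teo_hqtf_lyakina_fedorov.py | calc_value_i
-- ===== SOURCE A (Python) =====
-- def calc_value_i(row):
--     """
--     Функция для подсчета значения
--     :return: число
--     """
--     lst_pr = [2,5,9,12,16,19,22,24]
--     lst_neg = [22]
--     value_forward = 0  # результат
--     for idx, value in enumerate(row,1):
--         if idx in lst_pr:
--             if idx not in lst_neg:
--                 value_forward += value
--             else:
--                 if value == 0:
--                     value_forward += 4
--                 elif value == 1:
--                     value_forward += 3
--                 elif value == 2:
--                     value_forward += 2
--                 elif value == 3: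
--                     value_forward += 1
--                 else:
--                     value_forward += 0
--
--
--     return value_forward
-- ===== SOURCE B (Python) =====
-- def calc_value_i(row):
--     n = len(row)
--     total = 0
--     for i in (2, 5, 9, 12, 16, 19, 24):
--         if i <= n:
--             total += row[i - 1]
--     if 22 <= n:
--         total += {0: 4, 1: 3, 2: 2, 3: 1}.get(row[21], 0)
--     return total
-- ===== Notes on version B (the rewrite author's own statement) =====
-- stated objective: faster
-- what changed: Instead of enumerating every row element and testing its 1-based index for list membership, B loops over the seven fixed target indices (adding row[i-1] when i <= len(row)) and handles index 22 separately via a dict lookup for the reversed 0..3 ramp, making the cost independent of row length.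
import Mathlib
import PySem

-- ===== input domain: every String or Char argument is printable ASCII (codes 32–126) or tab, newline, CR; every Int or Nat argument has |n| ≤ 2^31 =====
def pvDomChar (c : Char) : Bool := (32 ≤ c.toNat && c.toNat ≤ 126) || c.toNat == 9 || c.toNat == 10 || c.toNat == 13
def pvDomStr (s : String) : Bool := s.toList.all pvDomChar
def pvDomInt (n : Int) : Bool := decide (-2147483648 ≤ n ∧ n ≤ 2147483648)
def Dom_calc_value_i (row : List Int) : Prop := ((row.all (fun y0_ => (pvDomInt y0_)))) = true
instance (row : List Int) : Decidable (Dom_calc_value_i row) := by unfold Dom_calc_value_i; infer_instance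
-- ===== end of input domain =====

-- B replaces A's enumerate-and-test-membership loop over the whole row by a direct loop
-- over the seven plain target indices plus a separate dict-lookup for index 22 (objective: faster, O(1) vs O(n)).

-- ===== PORT A =====
def pvLstPr : List Int := [2, 5, 9, 12, 16, 19, 22, 24]
def pvLstNeg : List Int := [22]

def pvStepA (value_forward : Int) (p : Int × Int) : Int :=
  if p.1 ∈ pvLstPr then
    if p.1 ∉ pvLstNeg then value_forward + p.2
    else if p.2 = 0 then value_forward + 4
    else if p.2 = 1 then value_forward + 3
    else if p.2 = 2 then value_forward + 2
    else if p.2 = 3 then value_forward + 1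
    else value_forward + 0
  else value_forward

def calc_value_i (row : List Int) : Int :=
  (PySem.List.enumerate row 1).foldl pvStepA 0

-- ===== PORT B =====
def calc_value_i_alt (row : List Int) : Int :=
  let n := row.length
  let total : Int := ([2, 5, 9, 12, 16, 19, 24] : List Nat).foldl
    (fun total i => if i ≤ n then total + row.getD (i - 1) 0 else total) 0
  if 22 ≤ n then
    total + (PySem.Dict.ofList [((0 : Int), (4 : Int)), (1, 3), (2, 2), (3, 1)]).getD (row.getD 21 0) 0
  else total

-- ===== PRECONDITION & SPEC =====
def Spec_calc_value_i (row : List Int) (out : Int) : Prop := out = calc_value_i_alt row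
instance (row : List Int) (out : Int) : Decidable (Spec_calc_value_i row out) := by unfold Spec_calc_value_i; infer_instance

-- ===== CLAIM (what is proved, stated in full; the proofs are below) =====
def Claim_equal_calc_value_i : Prop := ∀ (row : List Int), Dom_calc_value_i row → Spec_calc_value_i row (calc_value_i row)

-- ===== LEMMAS AND PROOFS =====

-- reversed 0..3 ramp used at index 22
def pvRampChain (v : Int) : Int :=
  if v = 0 then 4 else if v = 1 then 3 else if v = 2 then 2 else if v = 3 then 1 else 0

-- contribution of the element with 1-based index idx and value v
def pvG (idx : Int) (v : Int) : Int :=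
  if idx = 2 ∨ idx = 5 ∨ idx = 9 ∨ idx = 12 ∨ idx = 16 ∨ idx = 19 ∨ idx = 24 then v
  else if idx = 22 then pvRampChain v
  else 0

-- one summand of B
def pvT (row : List Int) (i : Nat) : Int :=
  if i ≤ row.length then row.getD (i - 1) 0 else 0

theorem pvStepA_eq (a : Int) (p : Int × Int) : pvStepA a p = a + pvG p.1 p.2 := by
  unfold pvStepA pvG pvRampChain pvLstPr pvLstNeg
  simp only [List.mem_cons, List.not_mem_nil, or_false]
  split_ifs <;> omega

theorem pvRamp_eq (v : Int) :
    (PySem.Dict.ofList [((0 : Int), (4 : Int)), (1, 3), (2, 2), (3, 1)]).getD v 0 = pvRampChain v := by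
  unfold pvRampChain
  by_cases h0 : v = 0
  · subst h0; decide
  by_cases h1 : v = 1
  · subst h1; decide
  by_cases h2 : v = 2
  · subst h2; decide
  by_cases h3 : v = 3
  · subst h3; decide
  have e0 : ((0 : Int) == v) = false := beq_eq_false_iff_ne.mpr (Ne.symm h0)
  have e1 : ((1 : Int) == v) = false := beq_eq_false_iff_ne.mpr (Ne.symm h1)
  have e2 : ((2 : Int) == v) = false := beq_eq_false_iff_ne.mpr (Ne.symm h2)
  have e3 : ((3 : Int) == v) = false := beq_eq_false_iff_ne.mpr (Ne.symm h3)
  simp [PySem.Dict.getD, PySem.Dict.ofList, PySem.Dict.get?, PySem.Dict.update,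
    PySem.Dict.empty, PySem.Dict.insert, PySem.Dict.contains, List.find?, e0, e1, e2, e3, h0, h1, h2, h3]

theorem pvA_concat (xs : List Int) (x : Int) :
    calc_value_i (xs ++ [x]) = calc_value_i xs + pvG ((xs.length : Int) + 1) x := by
  unfold calc_value_i
  rw [PySem.List.enumerate_append, List.foldl_append,
    PySem.List.enumerate_cons, PySem.List.enumerate_nil]
  simp only [List.foldl]
  rw [pvStepA_eq, add_comm (1 : Int) (xs.length : Int)]

theorem pvGetD_append_lt (xs : List Int) (x : Int) (k : Nat) (h : k < xs.length) :
    (xs ++ [x]).getD k 0 = xs.getD k 0 := by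
  simp [List.getD, List.getElem?_append_left h]

theorem pvGetD_append_len (xs : List Int) (x : Int) :
    (xs ++ [x]).getD xs.length 0 = x := by
  simp [List.getD]

set_option maxHeartbeats 1600000 in
theorem pvB_eq (row : List Int) :
    calc_value_i_alt row =
      pvT row 2 + pvT row 5 + pvT row 9 + pvT row 12 + pvT row 16 + pvT row 19 + pvT row 24 +
      (if 22 ≤ row.length then pvRampChain (row.getD 21 0) else 0) := by
  unfold calc_value_i_alt pvT
  simp only [List.foldl, pvRamp_eq]
  split_ifs <;> ring

theorem pvT_concat (xs : List Int) (x : Int) (i : Nat) (hi : 1 ≤ i) :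
    pvT (xs ++ [x]) i = pvT xs i + (if i = xs.length + 1 then x else 0) := by
  unfold pvT
  rcases lt_trichotomy i (xs.length + 1) with h | h | h
  · have hlt : i - 1 < xs.length := by omega
    simp only [List.length_append, List.length_cons, List.length_nil]
    rw [pvGetD_append_lt xs x _ hlt]
    split_ifs <;> omega
  · have : i - 1 = xs.length := by omega
    rw [this]
    simp only [List.length_append, List.length_cons, List.length_nil, pvGetD_append_len]
    split_ifs <;> omega
  · simp only [List.length_append, List.length_cons, List.length_nil]
    split_ifs <;> omega

theorem pvG_split (n : Nat) (x : Int) :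
    (if 2 = n + 1 then x else 0) + (if 5 = n + 1 then x else 0) + (if 9 = n + 1 then x else 0) +
    (if 12 = n + 1 then x else 0) + (if 16 = n + 1 then x else 0) + (if 19 = n + 1 then x else 0) +
    (if 24 = n + 1 then x else 0) + (if n + 1 = 22 then pvRampChain x else 0) =
    pvG ((n : Int) + 1) x := by
  unfold pvG
  generalize pvRampChain x = r
  split_ifs <;> omega

theorem pvB_concat (xs : List Int) (x : Int) :
    calc_value_i_alt (xs ++ [x]) = calc_value_i_alt xs + pvG ((xs.length : Int) + 1) x := by
  rw [pvB_eq, pvB_eq xs,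
    pvT_concat xs x 2 (by omega), pvT_concat xs x 5 (by omega), pvT_concat xs x 9 (by omega),
    pvT_concat xs x 12 (by omega), pvT_concat xs x 16 (by omega), pvT_concat xs x 19 (by omega),
    pvT_concat xs x 24 (by omega), ← pvG_split xs.length x]
  simp only [List.length_append, List.length_cons, List.length_nil]
  by_cases h22 : xs.length + 1 = 22
  · have h21 : xs.length = 21 := by omega
    have : (xs ++ [x]).getD 21 0 = x := by rw [← h21]; exact pvGetD_append_len xs x
    rw [this]
    split_ifs <;> omega
  · have hne : ¬ (22 ≤ xs.length + 1) ∨ 22 ≤ xs.length := by omega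
    by_cases hle : 22 ≤ xs.length
    · have : (xs ++ [x]).getD 21 0 = xs.getD 21 0 := pvGetD_append_lt xs x 21 (by omega)
      rw [this]
      split_ifs <;> omega
    · split_ifs <;> omega

theorem pvMain (row : List Int) : calc_value_i row = calc_value_i_alt row := by
  induction row using List.reverseRecOn with
  | nil => decide
  | append_singleton xs x ih => rw [pvA_concat, pvB_concat, ih]

-- ===== VERDICT (by name: the statement is the Claim_ definition above) =====
theorem calc_value_i_spec : Claim_equal_calc_value_i := by
  intro row _
  unfold Spec_calc_value_i
  exact pvMain row
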